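-- pv_equiv track=rewrite | github.com/RuslanBergenov/advent_of_code | 2022/07_template/_07_02_solution.py | calculate_total_folder_sizes
-- ===== SOURCE A (Python) =====
-- import copy
--
-- def calculate_total_folder_sizes(folders_and_file_sizes):
--     total_folder_sizes = copy.deepcopy(folders_and_file_sizes)
--     for folder_path, size in folders_and_file_sizes.items():
--
--         for potential_subfolder_path, size in folders_and_file_sizes.items():
--             if folder_path!=potential_subfolder_path:
--                 if potential_subfolder_path.startswith(folder_path):
--                     total_folder_sizes[folder_path] += folders_and_file_sizes[potential_subfolder_path]
--     return total_folder_sizes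
-- ===== SOURCE B (Python) =====
-- def calculate_total_folder_sizes(folders_and_file_sizes):
--     # One pass over the entries: each entry pushes its size up to every
--     # ancestor prefix that is itself a key, instead of scanning all pairs.
--     totals = dict(folders_and_file_sizes)
--     folder_keys = set(folders_and_file_sizes)
--     for path, size in folders_and_file_sizes.items():
--         for cut in range(len(path)):
--             ancestor = path[:cut]
--             if ancestor in folder_keys:
--                 totals[ancestor] += size
--     return totals
-- ===== Notes on version B (the rewrite author's own statement) =====
-- stated objective: faster
-- what changed: Instead of comparing every folder against every other folder (O(n^2) startswith tests), B makes one pass over the entries and, for each path, enumerates its O(L) proper prefixes and adds the size to those prefixes that are keys, via a hash-set membership test.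
import Mathlib
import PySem

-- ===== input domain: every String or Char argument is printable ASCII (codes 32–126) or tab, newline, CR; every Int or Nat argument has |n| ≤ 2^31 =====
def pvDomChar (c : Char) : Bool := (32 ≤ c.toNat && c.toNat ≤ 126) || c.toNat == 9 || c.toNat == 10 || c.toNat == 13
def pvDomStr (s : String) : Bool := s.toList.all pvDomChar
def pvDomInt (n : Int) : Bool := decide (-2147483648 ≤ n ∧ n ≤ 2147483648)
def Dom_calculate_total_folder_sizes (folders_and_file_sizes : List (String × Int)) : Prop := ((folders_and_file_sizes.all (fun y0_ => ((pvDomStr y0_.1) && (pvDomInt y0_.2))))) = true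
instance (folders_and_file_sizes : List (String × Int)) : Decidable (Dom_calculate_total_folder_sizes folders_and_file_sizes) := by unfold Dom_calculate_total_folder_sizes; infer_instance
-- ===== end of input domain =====

-- B replaces A's all-pairs startswith scan by one pass that pushes each entry's size
-- to its own prefix keys (objective: faster, O(n*L) vs O(n^2*L)).

-- ===== PORT A =====
-- A receives a Python dict: with Pre_ (distinct keys) that dict is `PySem.Dict.mk l`.
-- body of A's inner loop: `total[folder_path] += folders_and_file_sizes[potential_subfolder_path]`
-- is `modify` / `getD` with default 0 — exact here because both keys are present in the dict.
def pvStepA (fs : PySem.Dict String Int) (fp : String × Int)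
    (total : PySem.Dict String Int) (ps : String × Int) : PySem.Dict String Int :=
  if fp.1 ≠ ps.1 then
    if PySem.Str.startswith ps.1 fp.1 then
      total.modify fp.1 0 (· + fs.getD ps.1 0)
    else total
  else total

def calculate_total_folder_sizes (folders_and_file_sizes : List (String × Int)) : List (String × Int) :=
  -- total_folder_sizes = copy.deepcopy(folders_and_file_sizes); the two nested
  -- for-loops over .items() are the two folds.
  (folders_and_file_sizes.foldl
     (fun total folder =>
       folders_and_file_sizes.foldl (pvStepA (PySem.Dict.mk folders_and_file_sizes) folder) total)
     (PySem.Dict.mk folders_and_file_sizes)).items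

-- ===== PORT B =====
-- body of B's inner loop: ancestor = path[:cut]; if ancestor in folder_keys: totals[ancestor] += size
def pvStepB (folder_keys : PySem.Set String) (qv : String × Int)
    (totals : PySem.Dict String Int) (cut : Int) : PySem.Dict String Int :=
  let ancestor := PySem.Str.slice qv.1 (some 0) (some cut)
  if ancestor ∈ folder_keys then totals.modify ancestor 0 (· + qv.2) else totals

def calculate_total_folder_sizes_alt (folders_and_file_sizes : List (String × Int)) : List (String × Int) :=
  -- totals = dict(folders_and_file_sizes); folder_keys = set(folders_and_file_sizes);
  -- for path, size in items: for cut in range(len(path)): …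
  (folders_and_file_sizes.foldl
     (fun totals qv =>
       (PySem.List.pyRange 0 (PySem.Str.len qv.1)).foldl
         (pvStepB (PySem.Set.ofList (folders_and_file_sizes.map Prod.fst)) qv) totals)
     (PySem.Dict.mk folders_and_file_sizes)).items

-- ===== PRECONDITION & SPEC =====
-- The Python argument is a dict, whose keys are distinct by construction; Pre_ states
-- exactly that for the association list (it excludes no input the Python can receive).
def Pre_calculate_total_folder_sizes (folders_and_file_sizes : List (String × Int)) : Prop :=
  (folders_and_file_sizes.map Prod.fst).Nodup
instance (folders_and_file_sizes : List (String × Int)) : Decidable (Pre_calculate_total_folder_sizes folders_and_file_sizes) := by unfold Pre_calculate_total_folder_sizes; infer_instance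

def pvWitness_calculate_total_folder_sizes : (List (String × Int)) :=
  [("/", 10), ("/a", 2), ("/a/b", 3), ("/c", 4)]

def Spec_calculate_total_folder_sizes (folders_and_file_sizes : List (String × Int)) (out : List (String × Int)) : Prop := out = calculate_total_folder_sizes_alt folders_and_file_sizes
instance (folders_and_file_sizes : List (String × Int)) (out : List (String × Int)) : Decidable (Spec_calculate_total_folder_sizes folders_and_file_sizes out) := by unfold Spec_calculate_total_folder_sizes; infer_instance

-- ===== CLAIM (what is proved, stated in full; the proofs are below) =====
def Claim_equal_calculate_total_folder_sizes : Prop := ∀ (folders_and_file_sizes : List (String × Int)), Dom_calculate_total_folder_sizes folders_and_file_sizes → Pre_calculate_total_folder_sizes folders_and_file_sizes → Spec_calculate_total_folder_sizes folders_and_file_sizes (calculate_total_folder_sizes folders_and_file_sizes)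

-- ===== LEMMAS AND PROOFS =====

-- the weight A adds to key k (scanning list m of potential subfolders, sizes read from fs)
def pvSA (fs : PySem.Dict String Int) (k : String) (m : List (String × Int)) : Int :=
  (m.map (fun ps => if k ≠ ps.1 ∧ PySem.Str.startswith ps.1 k then fs.getD ps.1 0 else 0)).sum

-- the weight B's inner loop over `cuts` adds to key k for entry qv
def pvSB (ks : PySem.Set String) (qv : String × Int) (k : String) (cuts : List Int) : Int :=
  (cuts.map (fun cut => if PySem.Str.slice qv.1 (some 0) (some cut) = k ∧
      PySem.Str.slice qv.1 (some 0) (some cut) ∈ ks then qv.2 else 0)).sum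

lemma pvStepA_getD_ne (fs : PySem.Dict String Int) (fp ps : String × Int)
    (t : PySem.Dict String Int) (k : String) (hk : k ≠ fp.1) :
    (pvStepA fs fp t ps).getD k 0 = t.getD k 0 := by
  unfold pvStepA
  split_ifs with h1 h2
  · rw [PySem.Dict.getD_modify, if_neg hk]
  · rfl
  · rfl

lemma innerA_getD (fs : PySem.Dict String Int) (fp : String × Int) (k : String)
    (m : List (String × Int)) : ∀ t : PySem.Dict String Int,
    (m.foldl (pvStepA fs fp) t).getD k 0
      = t.getD k 0 + (if k = fp.1 then pvSA fs fp.1 m else 0) := by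
  induction m with
  | nil => intro t; simp [pvSA]
  | cons ps m ih =>
    intro t
    rw [List.foldl_cons, ih]
    by_cases hk : k = fp.1
    · rw [if_pos hk, if_pos hk]
      unfold pvStepA
      split_ifs with h1 h2
      · rw [PySem.Dict.getD_modify, if_pos hk]
        have hs : pvSA fs fp.1 (ps :: m) = fs.getD ps.1 0 + pvSA fs fp.1 m := by
          simp only [pvSA, List.map_cons, List.sum_cons]
          rw [if_pos (show fp.1 ≠ ps.1 ∧ PySem.Str.startswith ps.1 fp.1 = true from ⟨h1, h2⟩)]
        rw [hk, hs]; ring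
      · have hs : pvSA fs fp.1 (ps :: m) = pvSA fs fp.1 m := by
          simp only [pvSA, List.map_cons, List.sum_cons]
          rw [if_neg (fun h : _ ∧ _ => h2 h.2), zero_add]
        rw [hs]
      · have h1' : fp.1 = ps.1 := not_not.mp h1
        have hs : pvSA fs fp.1 (ps :: m) = pvSA fs fp.1 m := by
          simp only [pvSA, List.map_cons, List.sum_cons]
          rw [if_neg (show ¬(fp.1 ≠ ps.1 ∧ PySem.Str.startswith ps.1 fp.1 = true)
            from fun h => h.1 h1'), zero_add]
        rw [hs]
    · rw [if_neg hk, if_neg hk, pvStepA_getD_ne fs fp ps t k hk]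

lemma innerA_keys (fs : PySem.Dict String Int) (fp : String × Int)
    (m : List (String × Int)) : ∀ t : PySem.Dict String Int, fp.1 ∈ t.keys →
    (m.foldl (pvStepA fs fp) t).keys = t.keys := by
  induction m with
  | nil => intro t _; rfl
  | cons ps m ih =>
    intro t ht
    rw [List.foldl_cons]
    have hkeys : (pvStepA fs fp t ps).keys = t.keys := by
      unfold pvStepA
      split_ifs with h1 h2
      · rw [PySem.Dict.keys_modify, PySem.Dict.keys_insert_of_contains]
        rw [PySem.Dict.contains_iff_mem_keys]; exact ht
      · rfl
      · rfl
    rw [ih _ (by rw [hkeys]; exact ht), hkeys]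

lemma outerA (l : List (String × Int)) (fs : PySem.Dict String Int) (k : String)
    (m : List (String × Int)) : ∀ t : PySem.Dict String Int,
    (∀ fp ∈ m, fp.1 ∈ t.keys) →
    ((m.foldl (fun total fp => l.foldl (pvStepA fs fp) total) t).keys = t.keys ∧
     (m.foldl (fun total fp => l.foldl (pvStepA fs fp) total) t).getD k 0
       = t.getD k 0 + (m.map (fun fp => if k = fp.1 then pvSA fs fp.1 l else 0)).sum) := by
  induction m with
  | nil => intro t _; simp
  | cons fp m ih =>
    intro t ht
    rw [List.foldl_cons]
    have hk1 : (l.foldl (pvStepA fs fp) t).keys = t.keys :=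
      innerA_keys fs fp l t (ht fp (by simp))
    have hrec := ih (l.foldl (pvStepA fs fp) t)
      (by intro q hq; rw [hk1]; exact ht q (by simp [hq]))
    refine ⟨by rw [hrec.1, hk1], ?_⟩
    rw [hrec.2, innerA_getD]
    simp [add_assoc]

lemma innerB_getD (ks : PySem.Set String) (qv : String × Int) (k : String)
    (cuts : List Int) : ∀ t : PySem.Dict String Int,
    (cuts.foldl (pvStepB ks qv) t).getD k 0 = t.getD k 0 + pvSB ks qv k cuts := by
  induction cuts with
  | nil => intro t; simp [pvSB]
  | cons c cuts ih =>
    intro t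
    rw [List.foldl_cons, ih]
    have hsb : pvSB ks qv k (c :: cuts)
        = (if PySem.Str.slice qv.1 (some 0) (some c) = k ∧
              PySem.Str.slice qv.1 (some 0) (some c) ∈ ks then qv.2 else 0)
          + pvSB ks qv k cuts := by
      simp [pvSB]
    rw [hsb]
    simp only [pvStepB]
    by_cases hmem : PySem.Str.slice qv.1 (some 0) (some c) ∈ ks
    · rw [if_pos hmem, PySem.Dict.getD_modify]
      by_cases heq : PySem.Str.slice qv.1 (some 0) (some c) = k
      · rw [if_pos heq.symm, if_pos ⟨heq, hmem⟩, heq]; ring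
      · rw [if_neg (fun h => heq h.symm), if_neg (fun h : _ ∧ _ => heq h.1)]; ring
    · rw [if_neg hmem, if_neg (fun h : _ ∧ _ => hmem h.2)]; ring

lemma innerB_keys (ks : PySem.Set String) (qv : String × Int)
    (cuts : List Int) : ∀ t : PySem.Dict String Int, (∀ s ∈ ks, s ∈ t.keys) →
    (cuts.foldl (pvStepB ks qv) t).keys = t.keys := by
  induction cuts with
  | nil => intro t _; rfl
  | cons c cuts ih =>
    intro t ht
    rw [List.foldl_cons]
    have hkeys : (pvStepB ks qv t c).keys = t.keys := by
      simp only [pvStepB]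
      split_ifs with h1
      · rw [PySem.Dict.keys_modify, PySem.Dict.keys_insert_of_contains]
        rw [PySem.Dict.contains_iff_mem_keys]; exact ht _ h1
      · rfl
    rw [ih _ (by rw [hkeys]; exact ht), hkeys]

lemma outerB (ks : PySem.Set String) (k : String)
    (m : List (String × Int)) : ∀ t : PySem.Dict String Int, (∀ s ∈ ks, s ∈ t.keys) →
    ((m.foldl (fun totals qv => (PySem.List.pyRange 0 (PySem.Str.len qv.1)).foldl (pvStepB ks qv) totals) t).keys = t.keys ∧
     (m.foldl (fun totals qv => (PySem.List.pyRange 0 (PySem.Str.len qv.1)).foldl (pvStepB ks qv) totals) t).getD k 0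
       = t.getD k 0 + (m.map (fun qv => pvSB ks qv k (PySem.List.pyRange 0 (PySem.Str.len qv.1)))).sum) := by
  induction m with
  | nil => intro t _; simp
  | cons qv m ih =>
    intro t ht
    rw [List.foldl_cons]
    have hk1 : ((PySem.List.pyRange 0 (PySem.Str.len qv.1)).foldl (pvStepB ks qv) t).keys = t.keys :=
      innerB_keys ks qv _ t ht
    have hrec := ih ((PySem.List.pyRange 0 (PySem.Str.len qv.1)).foldl (pvStepB ks qv) t)
      (by intro s hs; rw [hk1]; exact ht s hs)
    refine ⟨by rw [hrec.1, hk1], ?_⟩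
    rw [hrec.2, innerB_getD]
    simp [add_assoc]

-- key combinatorial fact: summing B's indicator over cut = 0..len(q)-1 gives exactly
-- A's "proper prefix" indicator (when k is a key)
lemma sum_prefix_cuts (q k : String) (v : Int) (ks : PySem.Set String) (hk : k ∈ ks) :
    pvSB ks (q, v) k (PySem.List.pyRange 0 (PySem.Str.len q))
      = if k ≠ q ∧ PySem.Str.startswith q k then v else 0 := by
  have hsl : ∀ j : Nat, (PySem.Str.slice q (some 0) (some (j:Int))).toList = q.toList.take j := by
    intro j; simp [pysem]
  have hrange : PySem.List.pyRange 0 (PySem.Str.len q)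
      = (List.range q.toList.length).map (fun j : Nat => (j : Int)) := by
    rw [PySem.Str.len_eq, PySem.List.pyRange_one]
    simp only [sub_zero, Int.toNat_natCast, zero_add]
  rw [pvSB, hrange, List.map_map]
  have hterm : ∀ j : Nat,
      ((fun cut => if PySem.Str.slice (q, v).1 (some 0) (some cut) = k ∧
          PySem.Str.slice (q, v).1 (some 0) (some cut) ∈ ks then (q, v).2 else 0)
        ∘ (fun j : Nat => (j:Int))) j
        = (if q.toList.take j = k.toList then v else 0) := by
    intro j
    simp only [Function.comp]
    by_cases h : PySem.Str.slice q (some 0) (some (j:Int)) = k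
    · rw [if_pos ⟨h, by rw [h]; exact hk⟩, if_pos (by rw [← hsl j, h])]
    · rw [if_neg (fun hc : _ ∧ _ => h hc.1),
        if_neg (fun hc => h (String.toList_inj.mp (by rw [hsl j, hc])))]
  rw [List.map_congr_left (fun j _ => hterm j)]
  have hiff : (k ≠ q ∧ PySem.Str.startswith q k = true)
      ↔ (k.toList <+: q.toList ∧ k.toList.length < q.toList.length) := by
    constructor
    · rintro ⟨hne, hsw⟩
      have hp : k.toList <+: q.toList := by
        rw [PySem.Str.startswith_eq] at hsw
        exact (PySem.Chars.startswith_iff _ _).mp hsw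
      refine ⟨hp, lt_of_le_of_ne hp.length_le ?_⟩
      intro hlen
      exact hne (String.toList_inj.mp (hp.eq_of_length hlen))
    · rintro ⟨hp, hlt⟩
      refine ⟨fun he => by rw [he] at hlt; omega, ?_⟩
      rw [PySem.Str.startswith_eq]
      exact (PySem.Chars.startswith_iff _ _).mpr hp
  have hsum : ((List.range q.toList.length).map
      (fun j => if q.toList.take j = k.toList then v else 0)).sum
      = ∑ j ∈ Finset.range q.toList.length, (if q.toList.take j = k.toList then v else 0) := rfl
  rw [hsum]
  by_cases hpre : k.toList <+: q.toList ∧ k.toList.length < q.toList.length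
  · have hcong : ∀ j ∈ Finset.range q.toList.length,
        (if q.toList.take j = k.toList then v else 0) = (if j = k.toList.length then v else 0) := by
      intro j hj
      rw [Finset.mem_range] at hj
      by_cases h : q.toList.take j = k.toList
      · rw [if_pos h, if_pos]
        have hlen := congrArg List.length h
        rw [List.length_take] at hlen
        omega
      · rw [if_neg h, if_neg]
        intro hj'
        exact h (by rw [hj']; exact (List.prefix_iff_eq_take.mp hpre.1).symm)
    rw [Finset.sum_congr rfl hcong, Finset.sum_ite_eq' (Finset.range q.toList.length) k.toList.length (fun _ => v),
      if_pos (Finset.mem_range.mpr hpre.2), if_pos (hiff.mpr hpre)]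
  · rw [Finset.sum_eq_zero, if_neg (fun hc => hpre (hiff.mp hc))]
    intro j hj
    rw [Finset.mem_range] at hj
    rw [if_neg]
    intro h
    apply hpre
    refine ⟨h ▸ List.take_prefix j q.toList, ?_⟩
    have hlen := congrArg List.length h
    rw [List.length_take] at hlen
    omega

-- with distinct keys, the one entry of l whose key is k contributes its weight once
lemma sum_ite_key (l : List (String × Int)) (k : String) (c : String → Int)
    (hnd : (l.map Prod.fst).Nodup) (hmem : k ∈ l.map Prod.fst) :
    (l.map (fun fp => if k = fp.1 then c fp.1 else 0)).sum = c k := by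
  induction l with
  | nil => simp at hmem
  | cons p l ih =>
    simp only [List.map_cons, List.nodup_cons, List.mem_cons] at hnd hmem
    rw [List.map_cons, List.sum_cons]
    rcases hmem with h | h
    · rw [if_pos h]
      have hz : (l.map (fun fp => if k = fp.1 then c fp.1 else 0)).sum = 0 := by
        apply List.sum_eq_zero
        intro x hx
        simp only [List.mem_map] at hx
        obtain ⟨fp, hfp, hfx⟩ := hx
        rw [← hfx, if_neg]
        intro hkk
        exact hnd.1 (by rw [← h, hkk]; exact List.mem_map_of_mem hfp)
      rw [hz, h, add_zero]
    · have hne : ¬ k = p.1 := by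
        intro hkk; exact hnd.1 (by rw [← hkk]; exact h)
      rw [if_neg hne, ih hnd.2 h, zero_add]

-- ===== VERDICT (by name: the statement is the Claim_ definition above) =====
theorem calculate_total_folder_sizes_spec : Claim_equal_calculate_total_folder_sizes := by
  intro l _ hpre
  unfold Pre_calculate_total_folder_sizes at hpre
  unfold Spec_calculate_total_folder_sizes calculate_total_folder_sizes calculate_total_folder_sizes_alt
  have hkeys0 : (PySem.Dict.mk l).keys = l.map Prod.fst := rfl
  have hAmem : ∀ fp ∈ l, fp.1 ∈ (PySem.Dict.mk l).keys := by
    intro fp hfp; rw [hkeys0]; exact List.mem_map_of_mem hfp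
  have hBmem : ∀ s ∈ PySem.Set.ofList (l.map Prod.fst), s ∈ (PySem.Dict.mk l).keys := by
    intro s hs; rw [hkeys0]; exact (PySem.Set.mem_ofList _ _).mp hs
  have hAk := fun k => outerA l (PySem.Dict.mk l) k l (PySem.Dict.mk l) hAmem
  have hBk := fun k =>
    outerB (PySem.Set.ofList (l.map Prod.fst)) k l (PySem.Dict.mk l) hBmem
  rw [PySem.Dict.items_eq_map_keys _ (by rw [(hAk "").1, hkeys0]; exact hpre) 0,
      PySem.Dict.items_eq_map_keys _ (by rw [(hBk "").1, hkeys0]; exact hpre) 0,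
      (hAk "").1, (hBk "").1, hkeys0]
  apply List.map_congr_left
  intro k hkmem
  rw [(hAk k).2, (hBk k).2,
    sum_ite_key l k (fun k' => pvSA (PySem.Dict.mk l) k' l) hpre hkmem]
  have hA' : pvSA (PySem.Dict.mk l) k l
      = (l.map (fun qv => if k ≠ qv.1 ∧ PySem.Str.startswith qv.1 k then qv.2 else 0)).sum := by
    rw [pvSA]
    apply congrArg List.sum
    apply List.map_congr_left
    intro ps hps
    by_cases hc : k ≠ ps.1 ∧ PySem.Str.startswith ps.1 k = true
    · rw [if_pos hc, if_pos hc,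
        PySem.Dict.getD_of_mem_items (PySem.Dict.mk l) hps (hkeys0 ▸ hpre) 0]
    · rw [if_neg hc, if_neg hc]
  have hB' : ∀ qv ∈ l,
      pvSB (PySem.Set.ofList (l.map Prod.fst)) qv k
        (PySem.List.pyRange 0 (PySem.Str.len qv.1))
      = if k ≠ qv.1 ∧ PySem.Str.startswith qv.1 k then qv.2 else 0 := by
    intro qv _
    exact sum_prefix_cuts qv.1 k qv.2 (PySem.Set.ofList (l.map Prod.fst))
      ((PySem.Set.mem_ofList _ _).mpr hkmem)
  rw [hA', List.map_congr_left hB']
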